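-- pv_equiv track=rewrite | github.com/karioth/FlowSynth | overfit_audio_sanity.py | _parse_manifest_paths
-- ===== SOURCE A (Python) =====
-- def _parse_manifest_paths(values: list[str] | None) -> list[str]:
--     if not values:
--         return []
--     manifest_paths = []
--     for value in values:
--         if value is None:
--             continue
--         for item in value.split(","):
--             item = item.strip()
--             if item:
--                 manifest_paths.append(item)
--     return manifest_paths
-- ===== SOURCE B (Python) =====
-- def _parse_manifest_paths(values: list[str] | None) -> list[str]:
--     if not values:
--         return []
--     out = []
--     for value in values:
--         if value is None:
--             continue
--         # single-pass character state machine: buf = current token so far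
--         # (leading whitespace never enters), pend = withheld trailing whitespace
--         buf = []
--         pend = []
--         for ch in value:
--             if ch == ',':
--                 if buf:
--                     out.append(''.join(buf))
--                 buf = []
--                 pend = []
--             elif ch.isspace():
--                 if buf:
--                     pend.append(ch)
--             else:
--                 buf.extend(pend)
--                 pend = []
--                 buf.append(ch)
--         if buf:
--             out.append(''.join(buf))
--     return out
-- ===== Notes on version B (the rewrite author's own statement) =====
-- stated objective: alternative
-- what changed: Replaces the split(",")+strip()+filter pipeline with a hand-written single-pass character state machine that builds each token directly (buf holds the token, pend withholds trailing whitespace, leading whitespace never enters), emitting on each comma; no split, strip or intermediate token lists.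
import Mathlib
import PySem

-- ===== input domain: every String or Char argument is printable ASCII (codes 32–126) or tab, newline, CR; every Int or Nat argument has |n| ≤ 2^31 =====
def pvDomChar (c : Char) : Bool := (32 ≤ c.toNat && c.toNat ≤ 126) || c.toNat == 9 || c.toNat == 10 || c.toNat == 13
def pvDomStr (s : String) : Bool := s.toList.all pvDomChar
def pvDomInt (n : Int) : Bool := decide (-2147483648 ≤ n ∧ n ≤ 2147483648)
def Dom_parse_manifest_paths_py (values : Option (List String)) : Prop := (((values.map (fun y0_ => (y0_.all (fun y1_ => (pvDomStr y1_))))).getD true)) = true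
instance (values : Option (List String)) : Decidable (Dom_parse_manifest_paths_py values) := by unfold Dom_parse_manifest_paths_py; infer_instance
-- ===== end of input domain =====

-- B replaces the split/strip/filter pipeline with a single-pass character state machine
-- that builds each token directly (same cost, a different algorithm).
-- (Python `value is None` cannot fire here: the element type is String, so both ports drop that branch.)
-- ===== PORT A =====
-- `value.split(",")`: sep is the non-empty literal ",", so Str.split? is always `some`; getD [] is unreachable.
def parse_manifest_paths_py (values : Option (List String)) : List String :=
  match values with
  | none => []
  | some vs =>
    if vs = [] then []          -- `if not values: return []`
    else
      vs.foldl (fun acc value =>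
        ((PySem.Str.split? value ",").getD []).foldl (fun acc item =>
          let item := PySem.Str.strip item
          if item ≠ "" then acc ++ [item] else acc) acc) []

-- ===== PORT B =====
-- per-character step of Source B's inner loop: state = (buf, pend, out)
def pvStep (st : List Char × List Char × List String) (ch : Char) :
    List Char × List Char × List String :=
  if ch = ',' then
    ([], [], if st.1 ≠ [] then st.2.2 ++ [String.ofList st.1] else st.2.2)
  else if PySem.Chars.isspace ch then
    (st.1, (if st.1 ≠ [] then st.2.1 ++ [ch] else st.2.1), st.2.2)
  else
    (st.1 ++ st.2.1 ++ [ch], [], st.2.2)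

-- Source B's per-value body: run the machine over the characters, then the final flush
def pvScan (out : List String) (value : String) : List String :=
  let r := value.toList.foldl pvStep ([], [], out)
  if r.1 ≠ [] then r.2.2 ++ [String.ofList r.1] else r.2.2

def parse_manifest_paths_py_alt (values : Option (List String)) : List String :=
  match values with
  | none => []
  | some vs =>
    if vs = [] then []
    else vs.foldl pvScan []

-- ===== PRECONDITION & SPEC =====
def Spec_parse_manifest_paths_py (values : Option (List String)) (out : List String) : Prop := out = parse_manifest_paths_py_alt values
instance (values : Option (List String)) (out : List String) : Decidable (Spec_parse_manifest_paths_py values out) := by unfold Spec_parse_manifest_paths_py; infer_instance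

-- ===== CLAIM (what is proved, stated in full; the proofs are below) =====
def Claim_equal_parse_manifest_paths_py : Prop := ∀ (values : Option (List String)), Dom_parse_manifest_paths_py values → Spec_parse_manifest_paths_py values (parse_manifest_paths_py values)

-- ===== LEMMAS AND PROOFS =====

-- small general list facts
theorem cons_headI_tail {α : Type} [Inhabited α] (l : List α) (h : l ≠ []) :
    l.headI :: l.tail = l := by cases l with | nil => exact absurd rfl h | cons a l => rfl

-- character-level comma splitter used as the common specification of `split?` on sep = ","
def sp (c : Char) : List Char → List (List Char)
  | [] => [[]]
  | a :: l => if a = c then [] :: sp c l else ((a :: (sp c l).headI) :: (sp c l).tail)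

theorem sp_ne_nil (c : Char) (l : List Char) : sp c l ≠ [] := by
  cases l with
  | nil => simp [sp]
  | cons a l => simp only [sp]; split <;> simp

theorem go_spec (c : Char) : ∀ (fuel : Nat) (l cur : List Char) (acc : List (List Char)),
    l.length < fuel →
    PySem.Chars.splitOn.go [c] fuel l cur acc
      = acc.reverse ++ ((cur.reverse ++ (sp c l).headI) :: (sp c l).tail) := by
  intro fuel
  induction fuel with
  | zero => intro l cur acc h; omega
  | succ fuel ih =>
    intro l cur acc h
    cases l with
    | nil => simp [PySem.Chars.splitOn.go, sp]
    | cons a l =>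
      by_cases hac : a = c
      · subst hac
        rw [PySem.Chars.splitOn.go]
        simp only [List.isPrefixOf, beq_self_eq_true, Bool.true_and,
          if_true, List.length_cons, List.length_nil, List.drop_succ_cons, List.drop_zero]
        rw [ih l [] (cur.reverse :: acc) (by simpa using Nat.lt_of_succ_lt_succ h)]
        simp [sp, cons_headI_tail (sp a l) (sp_ne_nil a l)]
      · rw [PySem.Chars.splitOn.go]
        have hpre : List.isPrefixOf [c] (a :: l) = false := by
          simp only [List.isPrefixOf, Bool.and_true, beq_eq_false_iff_ne]
          intro hh; exact absurd hh.symm hac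
        rw [hpre]
        simp only [Bool.false_eq_true, if_false]
        rw [ih l (a :: cur) acc (by simpa using Nat.lt_of_succ_lt_succ h)]
        simp [sp, hac]

theorem splitOn_eq_sp (c : Char) (l : List Char) : PySem.Chars.splitOn l [c] = sp c l := by
  unfold PySem.Chars.splitOn
  rw [go_spec c (l.length + 1) l [] [] (Nat.lt_succ_self _)]
  simp [cons_headI_tail (sp c l) (sp_ne_nil c l)]

-- `split?` on the non-empty sep "," is `some`, and at the Chars level it is `sp ','`
theorem splitComma_eq (s : String) :
    (PySem.Str.split? s ",").getD [] = (sp ',' s.toList).map String.ofList := by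
  have h := PySem.Str.split?_map s ","
  have hc : PySem.Chars.split? s.toList ",".toList = some (sp ',' s.toList) := by
    have h1 : (",".toList : List Char) = [','] := by decide
    rw [h1, PySem.Chars.split?]
    simp [splitOn_eq_sp]
  rw [hc] at h
  cases hs : PySem.Str.split? s "," with
  | none => rw [hs] at h; simp at h
  | some w =>
    rw [hs] at h
    simp only [Option.map_some, Option.some.injEq] at h
    simp only [Option.getD_some]
    have h3 : w.map String.toList = ((sp ',' s.toList).map String.ofList).map String.toList := by
      rw [h]; simp [List.map_map, Function.comp_def]
    exact List.map_injective_iff.mpr (fun a b hab => String.toList_inj.mp hab) h3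

-- the token filter applied per source string (A's per-value contribution)
def tokensOf (v : String) : List String :=
  (((PySem.Str.split? v ",").getD []).map PySem.Str.strip).filter (fun t => t ≠ "")

theorem inner_foldl (l : List String) (acc : List String) :
    l.foldl (fun acc item =>
        let item := PySem.Str.strip item
        if item ≠ "" then acc ++ [item] else acc) acc
      = acc ++ (l.map PySem.Str.strip).filter (fun t => t ≠ "") := by
  induction l generalizing acc with
  | nil => simp
  | cons x l ih =>
    rw [List.foldl_cons, ih]
    by_cases hx : PySem.Str.strip x = "" <;> simp [hx]

theorem outer_foldl (vs : List String) (acc : List String) :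
    vs.foldl (fun acc value =>
        ((PySem.Str.split? value ",").getD []).foldl (fun acc item =>
          let item := PySem.Str.strip item
          if item ≠ "" then acc ++ [item] else acc) acc) acc
      = acc ++ vs.flatMap tokensOf := by
  induction vs generalizing acc with
  | nil => simp
  | cons v vs ih =>
    simp only [List.foldl_cons, List.flatMap_cons]
    rw [inner_foldl, ih, List.append_assoc]
    rfl

-- ===== characterisation of B's state machine =====

-- the value of the current token if the rest of the input (comma-free part t) runs out
def g (buf pend t : List Char) : List Char :=
  match t with
  | [] => buf
  | c :: t =>
    if PySem.Chars.isspace c then g buf (if buf ≠ [] then pend ++ [c] else pend) t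
    else g (buf ++ pend ++ [c]) [] t

-- trailing-whitespace helper: what g appends after a nonempty buf
def gh (pend t : List Char) : List Char :=
  match t with
  | [] => []
  | c :: t =>
    if PySem.Chars.isspace c then gh (pend ++ [c]) t
    else pend ++ [c] ++ gh [] t

theorem rstrip_allspace (pend : List Char) (hp : ∀ c ∈ pend, PySem.Chars.isspace c = true) :
    PySem.Chars.rstrip pend = [] := by
  unfold PySem.Chars.rstrip
  have : pend.reverse.dropWhile PySem.Chars.isspace = [] := by
    apply List.dropWhile_eq_nil_iff.mpr
    intro x hx; exact hp x (List.mem_reverse.mp hx)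
  simp [this]

theorem rstrip_append_nonspace (a t : List Char) (c : Char)
    (hc : PySem.Chars.isspace c = false) :
    PySem.Chars.rstrip (a ++ c :: t) = a ++ c :: PySem.Chars.rstrip t := by
  unfold PySem.Chars.rstrip
  rw [show a ++ c :: t = (a ++ [c]) ++ t by simp, List.reverse_append,
    List.dropWhile_append]
  by_cases ht : t.reverse.dropWhile PySem.Chars.isspace = []
  · simp [ht, hc]
  · simp [ht, List.isEmpty_iff]

theorem gh_eq_rstrip (t : List Char) : ∀ (pend : List Char),
    (∀ c ∈ pend, PySem.Chars.isspace c = true) →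
    gh pend t = PySem.Chars.rstrip (pend ++ t) := by
  induction t with
  | nil => intro pend hp; simp [gh, rstrip_allspace pend hp]
  | cons c t ih =>
    intro pend hp
    by_cases hc : PySem.Chars.isspace c = true
    · rw [gh, if_pos hc, ih (pend ++ [c]) (by
        intro x hx
        rcases List.mem_append.mp hx with h | h
        · exact hp x h
        · simp at h; subst h; exact hc)]
      simp
    · rw [gh, if_neg (by simp [hc]),
        rstrip_append_nonspace pend t c (by simpa using hc), ih [] (by simp)]
      simp

theorem g_of_ne_nil (t : List Char) : ∀ (buf pend : List Char), buf ≠ [] →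
    g buf pend t = buf ++ gh pend t := by
  induction t with
  | nil => intro buf pend _; simp [g, gh]
  | cons c t ih =>
    intro buf pend hb
    by_cases hc : PySem.Chars.isspace c = true
    · rw [g, if_pos hc, if_pos hb, gh, if_pos hc, ih buf (pend ++ [c]) hb]
    · rw [g, if_neg (by simp [hc]), gh, if_neg (by simp [hc]),
        ih (buf ++ pend ++ [c]) [] (by simp)]
      simp

theorem g_nil_eq_strip (t : List Char) : g [] [] t = PySem.Chars.strip t := by
  induction t with
  | nil => simp [g, PySem.Chars.strip, PySem.Chars.lstrip, PySem.Chars.rstrip]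
  | cons c t ih =>
    by_cases hc : PySem.Chars.isspace c = true
    · rw [g, if_pos hc, if_neg (by simp), ih]
      unfold PySem.Chars.strip PySem.Chars.lstrip
      rw [List.dropWhile_cons, if_pos hc]
    · rw [g, if_neg (by simp [hc])]
      simp only [List.nil_append]
      rw [g_of_ne_nil t [c] [] (by simp), gh_eq_rstrip t [] (by simp)]
      unfold PySem.Chars.strip PySem.Chars.lstrip
      rw [List.dropWhile_cons, if_neg (by simp [hc])]
      have h1 := rstrip_append_nonspace [] t c (by simpa using hc)
      simp only [List.nil_append] at h1 ⊢
      rw [h1]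
      rfl

-- emit a (possibly empty) finished token
def emit (s : List Char) : List String := if s = [] then [] else [String.ofList s]

-- the specification of the machine's output from state (buf, pend) on remaining chars l
def E (buf pend l : List Char) : List String :=
  emit (g buf pend (sp ',' l).headI) ++ (sp ',' l).tail.flatMap (fun t => emit (g [] [] t))

def pvFlush (r : List Char × List Char × List String) : List String :=
  if r.1 ≠ [] then r.2.2 ++ [String.ofList r.1] else r.2.2

theorem flatMap_headI_tail (l : List Char) (f : List Char → List String) :
    (sp ',' l).flatMap f = f (sp ',' l).headI ++ (sp ',' l).tail.flatMap f := by
  conv_lhs => rw [← cons_headI_tail (sp ',' l) (sp_ne_nil ',' l)]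
  rw [List.flatMap_cons]

theorem scan_spec (l : List Char) : ∀ (buf pend : List Char) (out : List String),
    pvFlush (l.foldl pvStep (buf, pend, out)) = out ++ E buf pend l := by
  induction l with
  | nil =>
    intro buf pend out
    simp only [List.foldl_nil, pvFlush, E, sp, List.headI, List.tail, List.flatMap_nil,
      List.append_nil, g]
    by_cases hb : buf = [] <;> simp [hb, emit]
  | cons c l ih =>
    intro buf pend out
    rw [List.foldl_cons]
    by_cases hcc : c = ','
    · subst hcc
      rw [show pvStep (buf, pend, out) ','
            = ([], [], if buf ≠ [] then out ++ [String.ofList buf] else out) from by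
          simp [pvStep], ih]
      have hs : sp ',' (',' :: l) = [] :: sp ',' l := by simp [sp]
      have hE : E buf pend (',' :: l) = emit buf ++ E [] [] l := by
        simp only [E, hs, List.headI_cons, List.tail_cons]
        rw [flatMap_headI_tail]
        rfl
      rw [hE]
      by_cases hb : buf = [] <;> simp [hb, emit]
    · have hs : sp ',' (c :: l) = (c :: (sp ',' l).headI) :: (sp ',' l).tail := by
        simp [sp, hcc]
      by_cases hsp : PySem.Chars.isspace c = true
      · rw [show pvStep (buf, pend, out) c
              = (buf, (if buf ≠ [] then pend ++ [c] else pend), out) from by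
            simp [pvStep, hcc, hsp], ih]
        congr 1
        simp only [E, hs, List.headI_cons, List.tail_cons]
        congr 2
        rw [g, if_pos hsp]
      · rw [show pvStep (buf, pend, out) c = (buf ++ pend ++ [c], [], out) from by
            simp [pvStep, hcc, hsp], ih]
        congr 1
        simp only [E, hs, List.headI_cons, List.tail_cons]
        congr 2
        rw [g, if_neg (by simp [hsp])]

theorem flatMap_emit_strip (ts : List (List Char)) :
    ts.flatMap (fun t => emit (PySem.Chars.strip t))
      = ((ts.map String.ofList).map PySem.Str.strip).filter (fun t => t ≠ "") := by
  induction ts with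
  | nil => simp
  | cons t ts ih =>
    simp only [List.flatMap_cons, List.map_cons, List.filter_cons, ih]
    have hs : PySem.Str.strip (String.ofList t) = String.ofList (PySem.Chars.strip t) := by
      simp [PySem.Str.strip]
    rw [hs]
    by_cases h : PySem.Chars.strip t = [] <;> simp [h, emit]

theorem E_eq_tokensOf (v : String) : E [] [] v.toList = tokensOf v := by
  have h : E [] [] v.toList = (sp ',' v.toList).flatMap (fun t => emit (g [] [] t)) :=
    (flatMap_headI_tail v.toList (fun t => emit (g [] [] t))).symm
  rw [h]
  simp only [g_nil_eq_strip]
  rw [flatMap_emit_strip]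
  unfold tokensOf
  rw [splitComma_eq]

theorem alt_foldl (vs : List String) (acc : List String) :
    vs.foldl pvScan acc = acc ++ vs.flatMap tokensOf := by
  induction vs generalizing acc with
  | nil => simp
  | cons v vs ih =>
    rw [List.foldl_cons,
      show pvScan acc v = pvFlush (v.toList.foldl pvStep ([], [], acc)) from rfl,
      scan_spec v.toList [] [] acc, ih, E_eq_tokensOf, List.append_assoc, List.flatMap_cons]

-- ===== VERDICT (by name: the statement is the Claim_ definition above) =====
theorem parse_manifest_paths_py_spec : Claim_equal_parse_manifest_paths_py := by
  intro values _
  unfold Spec_parse_manifest_paths_py parse_manifest_paths_py parse_manifest_paths_py_alt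
  cases values with
  | none => rfl
  | some vs =>
    by_cases hvs : vs = []
    · simp [hvs]
    · simp only [hvs, if_false]
      rw [outer_foldl, alt_foldl]
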